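-- pv_equiv track=rewrite | github.com/macostav/Random-Attachment-Model | september_2025/simple_random_attachment.py | can_connect
-- ===== SOURCE A (Python) =====
-- def base_label(node):
--     """
--     For a given vertex, it will give only the base vertex label.
--     For instance, if given '3_1' -> '3'.
--
--     :param node: vertex
--     :return: vertex type
--     """
--     return node.split("_")[0]
--
-- def can_connect(comp1, comp2, edges):
--     """
--     Check if it is possible to connect comp1 and comp2.
--
--     :param comp1: set of vertices in the first component sampled
--     :param comp2: set of vertices in second component sampled
--     :param edges: list of edges in original graph
--     :return: True if there is at least one edge connecting two components, False otherwise
--     """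
--     # Write components only in terms of vertex types
--     base1 = {base_label(x) for x in comp1}
--     base2 = {base_label(x) for x in comp2}
--
--     if base1.isdisjoint(base2): # Only try to join if the components are disjoint
--         # Look for edges connecting the two components
--         for u, v in edges:
--             if (str(u) in base1 and str(v) in base2) or (str(v) in base1 and str(u) in base2):
--                 return True
--         return False
--     else:
--         return False
-- ===== SOURCE B (Python) =====
-- def base_label(node):
--     return node.split("_")[0]
--
-- def can_connect(comp1, comp2, edges):
--     base1 = {base_label(x) for x in comp1}
--     base2 = {base_label(x) for x in comp2}
--     if not base1.isdisjoint(base2):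
--         return False
--     edge_bases = {(str(u), str(v)) for u, v in edges}
--     return any((a, b) in edge_bases or (b, a) in edge_bases
--                for a in base1 for b in base2)
-- ===== Notes on version B (the rewrite author's own statement) =====
-- stated objective: alternative
-- what changed: Instead of scanning the edge list testing each endpoint against both base-label sets, B indexes the edges into a set of pairs once and then iterates over the base1 x base2 cross product, asking whether (a,b) or (b,a) is an edge.
import Mathlib
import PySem

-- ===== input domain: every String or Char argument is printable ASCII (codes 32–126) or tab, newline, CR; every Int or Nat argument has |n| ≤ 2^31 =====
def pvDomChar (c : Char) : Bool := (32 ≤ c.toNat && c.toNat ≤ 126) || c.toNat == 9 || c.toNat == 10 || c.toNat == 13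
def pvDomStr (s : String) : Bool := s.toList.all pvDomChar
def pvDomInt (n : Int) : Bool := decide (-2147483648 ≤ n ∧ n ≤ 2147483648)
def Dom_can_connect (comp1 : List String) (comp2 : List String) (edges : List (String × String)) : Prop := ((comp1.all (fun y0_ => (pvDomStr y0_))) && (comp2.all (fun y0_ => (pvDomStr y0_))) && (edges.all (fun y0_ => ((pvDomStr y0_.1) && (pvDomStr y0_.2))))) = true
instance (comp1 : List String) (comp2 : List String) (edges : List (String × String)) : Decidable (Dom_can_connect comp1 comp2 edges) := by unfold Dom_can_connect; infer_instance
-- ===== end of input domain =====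

-- B changes the traversal: it indexes the edges into a set of pairs and scans base1 × base2
-- instead of scanning the edge list against the two sets (objective: alternative).

-- ===== PORT A =====
-- base_label(node) = node.split("_")[0]; split? is some (sep "_" ≠ ""), and the result is never empty,
-- so the [0] access always succeeds (headD's default is never used).
def pyBaseLabel (node : String) : String := ((PySem.Str.split? node "_").getD []).headD ""

-- the 'for u, v in edges: … return True' loop with its early return
def canConnectLoopA (base1 base2 : PySem.Set String) : List (String × String) → Bool
  | [] => false
  | (u, v) :: rest =>
    if (PySem.Set.contains base1 u && PySem.Set.contains base2 v)
       || (PySem.Set.contains base1 v && PySem.Set.contains base2 u) then true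
    else canConnectLoopA base1 base2 rest

def can_connect (comp1 : List String) (comp2 : List String) (edges : List (String × String)) : Bool :=
  let base1 : PySem.Set String := PySem.Set.ofList (comp1.map pyBaseLabel)
  let base2 : PySem.Set String := PySem.Set.ofList (comp2.map pyBaseLabel)
  if PySem.Set.isdisjoint base1 base2 then
    canConnectLoopA base1 base2 edges
  else
    false

-- ===== PORT B =====
def can_connect_alt (comp1 : List String) (comp2 : List String) (edges : List (String × String)) : Bool :=
  let base1 : PySem.Set String := PySem.Set.ofList (comp1.map pyBaseLabel)
  let base2 : PySem.Set String := PySem.Set.ofList (comp2.map pyBaseLabel)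
  if !(PySem.Set.isdisjoint base1 base2) then
    false
  else
    let edgeBases : PySem.Set (String × String) := PySem.Set.ofList edges
    base1.any (fun a => base2.any (fun b =>
      PySem.Set.contains edgeBases (a, b) || PySem.Set.contains edgeBases (b, a)))

-- ===== PRECONDITION & SPEC =====
def Spec_can_connect (comp1 : List String) (comp2 : List String) (edges : List (String × String)) (out : Bool) : Prop := out = can_connect_alt comp1 comp2 edges
instance (comp1 : List String) (comp2 : List String) (edges : List (String × String)) (out : Bool) : Decidable (Spec_can_connect comp1 comp2 edges out) := by unfold Spec_can_connect; infer_instance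

-- ===== CLAIM (what is proved, stated in full; the proofs are below) =====
def Claim_equal_can_connect : Prop := ∀ (comp1 : List String) (comp2 : List String) (edges : List (String × String)), Dom_can_connect comp1 comp2 edges → Spec_can_connect comp1 comp2 edges (can_connect comp1 comp2 edges)

-- ===== LEMMAS AND PROOFS =====
theorem canConnectLoopA_eq_any (b1 b2 : PySem.Set String) (es : List (String × String)) :
    canConnectLoopA b1 b2 es
      = es.any (fun p => (PySem.Set.contains b1 p.1 && PySem.Set.contains b2 p.2)
                         || (PySem.Set.contains b1 p.2 && PySem.Set.contains b2 p.1)) := by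
  induction es with
  | nil => rfl
  | cons p rest ih =>
    obtain ⟨u, v⟩ := p
    simp only [canConnectLoopA, List.any_cons]
    split_ifs with h
    · simp only [h, Bool.true_or]
    · rw [Bool.not_eq_true] at h
      simp only [h, Bool.false_or, ih]

theorem loop_eq_cross (b1 b2 : PySem.Set String) (edges : List (String × String)) :
    canConnectLoopA b1 b2 edges
      = b1.any (fun a => b2.any (fun b =>
          PySem.Set.contains (PySem.Set.ofList edges) (a, b)
          || PySem.Set.contains (PySem.Set.ofList edges) (b, a))) := by
  rw [canConnectLoopA_eq_any, Bool.eq_iff_iff]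
  simp only [List.any_eq_true, Bool.or_eq_true, Bool.and_eq_true,
    PySem.Set.contains_iff, PySem.Set.mem_ofList]
  constructor
  · rintro ⟨⟨u, v⟩, hmem, h | h⟩
    · exact ⟨u, h.1, v, h.2, Or.inl hmem⟩
    · exact ⟨v, h.1, u, h.2, Or.inr hmem⟩
  · rintro ⟨a, ha, b, hb, h | h⟩
    · exact ⟨(a, b), h, Or.inl ⟨ha, hb⟩⟩
    · exact ⟨(b, a), h, Or.inr ⟨ha, hb⟩⟩

-- ===== VERDICT (by name: the statement is the Claim_ definition above) =====
theorem can_connect_spec : Claim_equal_can_connect := by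
  intro comp1 comp2 edges _
  unfold Spec_can_connect can_connect can_connect_alt
  cases h : PySem.Set.isdisjoint (PySem.Set.ofList (comp1.map pyBaseLabel))
      (PySem.Set.ofList (comp2.map pyBaseLabel)) with
  | false => simp [h]
  | true => simp [h, loop_eq_cross]
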